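-- pv_equiv track=rewrite | github.com/balaban1432/python-studies | teamwork/08_team_work.py | convert_time
-- ===== SOURCE A (Python) =====
-- def convert_time(time):
--     value = [3600000, 60000, 1000]
--     unit = [" hour/s ", " minute/s ", " second/s "]
--     i = 0
--     result = ""
--     while time >= 1000:
--         if time >= value[i]:
--             result += str(time // value[i]) + unit[i]
--             time = time % value[i]
--         else:
--             i += 1
--     return result
-- ===== SOURCE B (Python) =====
-- def convert_time(time):
--     if time < 1000:
--         return ""
--     hours = time // 3600000
--     minutes = time % 3600000 // 60000
--     seconds = time % 60000 // 1000
--     result = ""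
--     if hours > 0:
--         result += str(hours) + " hour/s "
--     if minutes > 0:
--         result += str(minutes) + " minute/s "
--     if seconds > 0:
--         result += str(seconds) + " second/s "
--     return result
-- ===== Notes on version B (the rewrite author's own statement) =====
-- stated objective: simpler
-- what changed: Replaces the table-driven while loop with a mutating index by straight-line arithmetic: each unit quantity is computed directly with // and %, and non-zero components are concatenated in order.
import Mathlib
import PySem

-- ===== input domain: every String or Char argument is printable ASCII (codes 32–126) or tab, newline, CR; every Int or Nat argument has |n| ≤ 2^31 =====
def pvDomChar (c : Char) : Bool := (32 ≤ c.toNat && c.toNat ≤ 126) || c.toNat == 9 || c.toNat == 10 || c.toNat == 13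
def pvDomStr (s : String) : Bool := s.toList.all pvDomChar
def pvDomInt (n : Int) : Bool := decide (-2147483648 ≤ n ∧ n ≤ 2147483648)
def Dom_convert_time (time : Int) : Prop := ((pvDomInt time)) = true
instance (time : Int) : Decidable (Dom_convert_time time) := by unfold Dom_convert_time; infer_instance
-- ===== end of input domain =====

-- B replaces A's table-driven while loop (mutating index over unit tables) by
-- straight-line //-and-% arithmetic per unit; same return value for every input.

-- ===== PORT A =====
-- A's constant tables
def pvValsA : List Int := [3600000, 60000, 1000]
def pvUnitsA : List String := [" hour/s ", " minute/s ", " second/s "]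
-- A's while loop; the 'i < 3' guard only makes the list indexing total (Python's
-- i provably never leaves {0,1,2} while the loop runs, so the guard never fires).
def convert_time_loop (time : Int) (i : Nat) (result : String) : String :=
  if hi : i < 3 then
    if h : time ≥ 1000 then
      let v := pvValsA.getD i 0
      if hv : time ≥ v then
        convert_time_loop (PySem.Int.mod time v) i
          (result ++ PySem.Int.toStr (PySem.Int.floordiv time v) ++ pvUnitsA.getD i "")
      else
        convert_time_loop time (i + 1) result
    else result
  else result
termination_by (time.toNat, 3 - i)
decreasing_by
  · have hvpos : (0:Int) < pvValsA.getD i 0 := by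
      interval_cases i <;> simp [pvValsA]
    have _h1 : 0 ≤ PySem.Int.mod time (pvValsA.getD i 0) :=
      PySem.Int.mod_nonneg _ hvpos
    have h2 : PySem.Int.mod time (pvValsA.getD i 0) < pvValsA.getD i 0 :=
      PySem.Int.mod_lt _ hvpos
    have : (PySem.Int.mod time (pvValsA.getD i 0)).toNat < time.toNat := by omega
    exact Prod.Lex.left _ _ this
  · exact Prod.Lex.right _ (by omega)

def convert_time (time : Int) : String := convert_time_loop time 0 ""

-- ===== PORT B =====
def convert_time_alt (time : Int) : String :=
  if time < 1000 then ""
  else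
    let hours := PySem.Int.floordiv time 3600000
    let minutes := PySem.Int.floordiv (PySem.Int.mod time 3600000) 60000
    let seconds := PySem.Int.floordiv (PySem.Int.mod time 60000) 1000
    (if hours > 0 then PySem.Int.toStr hours ++ " hour/s " else "") ++
    (if minutes > 0 then PySem.Int.toStr minutes ++ " minute/s " else "") ++
    (if seconds > 0 then PySem.Int.toStr seconds ++ " second/s " else "")

-- ===== PRECONDITION & SPEC =====
def Spec_convert_time (time : Int) (out : String) : Prop := out = convert_time_alt time
instance (time : Int) (out : String) : Decidable (Spec_convert_time time out) := by unfold Spec_convert_time; infer_instance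

-- ===== CLAIM (what is proved, stated in full; the proofs are below) =====
def Claim_equal_convert_time : Prop := ∀ (time : Int), Dom_convert_time time → Spec_convert_time time (convert_time time)

-- ===== LEMMAS AND PROOFS =====

theorem loop_at2 (t : Int) (r : String) :
    convert_time_loop t 2 r =
      if 1000 ≤ t then r ++ PySem.Int.toStr (PySem.Int.floordiv t 1000) ++ " second/s " else r := by
  by_cases ht : 1000 ≤ t
  · have hm0 : 0 ≤ PySem.Int.mod t 1000 := PySem.Int.mod_nonneg _ (by norm_num)
    have hm1 : PySem.Int.mod t 1000 < 1000 := PySem.Int.mod_lt _ (by norm_num)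
    rw [convert_time_loop]
    simp only [pvValsA, pvUnitsA]
    rw [convert_time_loop]
    simp [ht]
    omega
  · rw [convert_time_loop]
    simp [ht]

theorem loop_at1 (t : Int) (r : String) (h0 : 0 ≤ t) (h1 : t < 3600000) :
    convert_time_loop t 1 r =
      r ++ (if 60000 ≤ t then PySem.Int.toStr (PySem.Int.floordiv t 60000) ++ " minute/s " else "")
        ++ (if 1000 ≤ PySem.Int.mod t 60000 then
              PySem.Int.toStr (PySem.Int.floordiv (PySem.Int.mod t 60000) 1000) ++ " second/s "
            else "") := by
  have hidx : (pvValsA.getD 1 0) = 60000 := rfl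
  have hidxu : (pvUnitsA.getD 1 "") = " minute/s " := rfl
  by_cases hm : 60000 ≤ t
  · have hm0 : 0 ≤ PySem.Int.mod t 60000 := PySem.Int.mod_nonneg _ (by norm_num)
    have hm1 : PySem.Int.mod t 60000 < 60000 := PySem.Int.mod_lt _ (by norm_num)
    rw [convert_time_loop]
    rw [dif_pos (by norm_num : (1:Nat) < 3), dif_pos (by omega : t ≥ 1000)]
    simp only [hidx, hidxu]
    rw [dif_pos (by omega : t ≥ 60000)]
    rw [convert_time_loop]
    rw [dif_pos (by norm_num : (1:Nat) < 3)]
    have hme : PySem.Int.mod t 60000 = t % 60000 :=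
      PySem.Int.mod_eq_emod_of_pos (by norm_num : (0:Int) < 60000)
    by_cases hs : 1000 ≤ t % 60000
    · rw [dif_pos (by omega : PySem.Int.mod t 60000 ≥ 1000)]
      simp only [hidx]
      rw [dif_neg (by omega)]
      rw [loop_at2]
      simp [hm, hs, String.append_assoc]
    · rw [dif_neg (by omega)]
      simp [hm, hs, String.append_assoc]
  · have hmt : t % 60000 = t := Int.emod_eq_of_lt h0 (by omega)
    have hmt' : PySem.Int.mod t 60000 = t := by
      rw [PySem.Int.mod_eq_emod_of_pos (by norm_num : (0:Int) < 60000)]; exact hmt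
    rw [convert_time_loop]
    rw [dif_pos (by norm_num : (1:Nat) < 3)]
    by_cases ht : 1000 ≤ t
    · rw [dif_pos (by omega : t ≥ 1000)]
      simp only [hidx]
      rw [dif_neg (by omega)]
      rw [loop_at2]
      simp [hm, hmt, ht, String.append_assoc]
    · rw [dif_neg (by omega)]
      simp [hm, hmt, ht]

theorem loop_at0 (t : Int) (h0 : 0 ≤ t) :
    convert_time_loop t 0 "" =
      (if 3600000 ≤ t then PySem.Int.toStr (t / 3600000) ++ " hour/s " else "")
        ++ (if 60000 ≤ t % 3600000 then PySem.Int.toStr (t % 3600000 / 60000) ++ " minute/s " else "")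
        ++ (if 1000 ≤ t % 60000 then PySem.Int.toStr (t % 60000 / 1000) ++ " second/s " else "") := by
  have hidx : (pvValsA.getD 0 0) = 3600000 := rfl
  have hidxu : (pvUnitsA.getD 0 "") = " hour/s " := rfl
  have hdd : t % 3600000 % 60000 = t % 60000 :=
    Int.emod_emod_of_dvd t (by norm_num)
  by_cases hh : 3600000 ≤ t
  · have hme : PySem.Int.mod t 3600000 = t % 3600000 :=
      PySem.Int.mod_eq_emod_of_pos (by norm_num : (0:Int) < 3600000)
    have hm0 : 0 ≤ t % 3600000 := Int.emod_nonneg t (by norm_num)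
    have hm1 : t % 3600000 < 3600000 := Int.emod_lt_of_pos t (by norm_num)
    rw [convert_time_loop]
    rw [dif_pos (by norm_num : (0:Nat) < 3), dif_pos (by omega : t ≥ 1000)]
    simp only [hidx, hidxu]
    rw [dif_pos (by omega : t ≥ 3600000)]
    rw [convert_time_loop]
    rw [dif_pos (by norm_num : (0:Nat) < 3)]
    by_cases ht : 1000 ≤ t % 3600000
    · rw [dif_pos (by omega : PySem.Int.mod t 3600000 ≥ 1000)]
      simp only [hidx]
      rw [dif_neg (by omega)]
      rw [loop_at1 _ _ (by omega) (by omega)]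
      simp [hh, hdd, String.append_assoc]
    · rw [dif_neg (by omega)]
      have h2 : ¬ (60000 ≤ t % 3600000) := by omega
      have h3 : ¬ (1000 ≤ t % 60000) := by omega
      simp [hh, h2, h3]
  · have hmt : t % 3600000 = t := Int.emod_eq_of_lt h0 (by omega)
    rw [convert_time_loop]
    rw [dif_pos (by norm_num : (0:Nat) < 3)]
    by_cases ht : 1000 ≤ t
    · rw [dif_pos (by omega : t ≥ 1000)]
      simp only [hidx]
      rw [dif_neg (by omega)]
      rw [loop_at1 _ _ h0 (by omega)]
      simp [hh, hmt]
    · rw [dif_neg (by omega)]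
      have h2 : ¬ (60000 ≤ t % 3600000) := by omega
      have h3 : ¬ (1000 ≤ t % 60000) := by omega
      simp [hh, h2, h3]

theorem convert_time_eq_alt (t : Int) : convert_time t = convert_time_alt t := by
  by_cases hlt : t < 1000
  · rw [convert_time, convert_time_loop]
    simp [convert_time_alt, hlt]
  · have h0 : 0 ≤ t := by omega
    rw [convert_time, loop_at0 t h0]
    simp only [convert_time_alt, if_neg hlt]
    have f1 : PySem.Int.floordiv t 3600000 = t / 3600000 :=
      PySem.Int.floordiv_eq_ediv_of_pos (by norm_num)
    have f2 : PySem.Int.mod t 3600000 = t % 3600000 :=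
      PySem.Int.mod_eq_emod_of_pos (by norm_num)
    have f3 : PySem.Int.mod t 60000 = t % 60000 :=
      PySem.Int.mod_eq_emod_of_pos (by norm_num)
    have f4 : PySem.Int.floordiv (t % 3600000) 60000 = t % 3600000 / 60000 :=
      PySem.Int.floordiv_eq_ediv_of_pos (by norm_num)
    have f5 : PySem.Int.floordiv (t % 60000) 1000 = t % 60000 / 1000 :=
      PySem.Int.floordiv_eq_ediv_of_pos (by norm_num)
    have e1 : (0 < t / 3600000) = (3600000 ≤ t) := by rw [eq_iff_iff]; omega
    have e2 : (0 < t % 3600000 / 60000) = (60000 ≤ t % 3600000) := by rw [eq_iff_iff]; omega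
    have e3 : (0 < t % 60000 / 1000) = (1000 ≤ t % 60000) := by rw [eq_iff_iff]; omega
    simp only [f1, f2, f3, f4, f5, e1, e2, e3, String.append_assoc]

-- ===== VERDICT (by name: the statement is the Claim_ definition above) =====
theorem convert_time_spec : Claim_equal_convert_time := by
  intro t _
  unfold Spec_convert_time
  exact convert_time_eq_alt t
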